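-- pv_equiv track=rewrite | github.com/Adjiedjiewhy/Adjie-Shor-ProjectQ | shor.py | find_q
-- ===== SOURCE A (Python) =====
-- def find_q(N):
--     notFound = True
--     power = 1
--     while(notFound):
--         q = 2**power
--         if(q >= N**2):
--             notFound = False
--         power = power + 1
--     return q
-- ===== SOURCE B (Python) =====
-- def find_q(N):
--     return 2 ** max(1, (N * N - 1).bit_length())
-- ===== Notes on version B (the rewrite author's own statement) =====
-- stated objective: simpler
-- what changed: Replaces the doubling while-loop with the closed form 2**max(1,(N*N-1).bit_length()), which yields the smallest power of two >= N*N with exponent at least 1.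
import Mathlib
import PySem

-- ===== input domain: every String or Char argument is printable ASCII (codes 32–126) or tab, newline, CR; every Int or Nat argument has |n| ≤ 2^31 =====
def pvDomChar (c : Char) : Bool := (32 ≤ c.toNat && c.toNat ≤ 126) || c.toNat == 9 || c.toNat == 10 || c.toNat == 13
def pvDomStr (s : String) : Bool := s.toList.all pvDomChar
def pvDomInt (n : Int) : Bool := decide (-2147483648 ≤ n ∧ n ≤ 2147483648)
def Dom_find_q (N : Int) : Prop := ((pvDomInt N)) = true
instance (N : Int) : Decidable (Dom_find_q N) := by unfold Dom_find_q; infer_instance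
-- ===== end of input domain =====

-- B replaces A's doubling while-loop by the closed form 2^max(1, bit_length(N*N-1)): simpler, one arithmetic expression.


-- ===== PORT A =====
-- the while-loop of A: q = 2**power; if q >= N**2 stop else power += 1.  Fuel only makes the
-- recursion total; under Dom_find_q the loop always stops well within 100 iterations.
def findqLoop (N : Int) (power : Nat) : Nat → Int
  | 0 => 0
  | fuel+1 => if (2:Int)^power ≥ N^2 then (2:Int)^power else findqLoop N (power+1) fuel

def find_q (N : Int) : Int := findqLoop N 1 100

-- ===== PORT B =====
-- Python int.bit_length (argument here is N*N-1 ≥ -1; Python uses the absolute value)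
def intBitLength (x : Int) : Nat := if x = 0 then 0 else Nat.log2 x.natAbs + 1

def find_q_alt (N : Int) : Int := 2 ^ max 1 (intBitLength (N * N - 1))

-- ===== PRECONDITION & SPEC =====
def Spec_find_q (N : Int) (out : Int) : Prop := out = find_q_alt N
instance (N : Int) (out : Int) : Decidable (Spec_find_q N out) := by unfold Spec_find_q; infer_instance

-- ===== CLAIM (what is proved, stated in full; the proofs are below) =====
def Claim_equal_find_q : Prop := ∀ (N : Int), Dom_find_q N → Spec_find_q N (find_q N)

-- ===== LEMMAS AND PROOFS =====

/-- The loop returns `2^e` where `e` is the first exponent (≥ the start) whose power reaches `N^2`,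
    provided there is enough fuel. -/
lemma findqLoop_eq (N : Int) (e : Nat)
    (he : (2:Int)^e ≥ N^2) (hlt : ∀ k, 1 ≤ k → k < e → (2:Int)^k < N^2) :
    ∀ f p, 1 ≤ p → p ≤ e → e - p < f → findqLoop N p f = (2:Int)^e := by
  intro f
  induction f with
  | zero => intro p _ _ h; omega
  | succ f ih =>
      intro p hp1 hpe hf
      unfold findqLoop
      by_cases h : (2:Int)^p ≥ N^2
      · have : p = e := by
          by_contra hne
          exact absurd h (not_le.mpr (hlt p hp1 (lt_of_le_of_ne hpe hne)))
        subst this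
        rw [if_pos h]
      · have hpe' : p < e := by
          rcases lt_or_eq_of_le hpe with h' | h'
          · exact h'
          · exact absurd (h' ▸ he) h
        simp only [h, if_false]
        exact ih (p+1) (by omega) hpe' (by omega)

lemma sq_eq (N : Int) : N^2 = N * N := by ring

theorem find_q_spec : Claim_equal_find_q := by
  intro N hdom
  unfold Spec_find_q find_q find_q_alt
  have hM0 : 0 ≤ N * N := mul_self_nonneg N
  set M : Int := N * N with hMdef
  by_cases hM : M ≤ 1
  · -- e = 1 : intBitLength (M-1) ≤ 1 since M-1 ∈ {-1, 0}
    have he1 : max 1 (intBitLength (M - 1)) = 1 := by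
      unfold intBitLength
      interval_cases M <;> decide
    rw [he1]
    apply findqLoop_eq N 1
    · rw [sq_eq]; omega
    · intro k hk1 hk
      omega
    · omega
    · omega
    · omega
  · -- M ≥ 2
    replace hM : 2 ≤ M := by omega
    set t : Nat := (M - 1).natAbs with htdef
    have ht1 : 1 ≤ t := by
      have := Int.natAbs_of_nonneg (a := M - 1) (by omega)
      omega
    have htM : (t : Int) = M - 1 := Int.natAbs_of_nonneg (by omega)
    have hbl : intBitLength (M - 1) = Nat.log2 t + 1 := by
      unfold intBitLength
      rw [if_neg (by omega)]
    have hemax : max 1 (intBitLength (M - 1)) = Nat.log2 t + 1 := by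
      rw [hbl]; omega
    rw [hemax]
    set e : Nat := Nat.log2 t + 1 with hedef
    have hlow : 2 ^ Nat.log2 t ≤ t := Nat.log2_self_le (by omega)
    have hhigh : t < 2 ^ e := Nat.lt_log2_self
    apply findqLoop_eq N e
    · -- 2^e ≥ M
      rw [sq_eq]
      have : (t : Int) < (2:Int)^e := by
        have := hhigh
        exact_mod_cast this
      omega
    · -- ∀ k, 1 ≤ k < e → 2^k < M
      intro k _ hk
      rw [sq_eq]
      have hkn : k ≤ Nat.log2 t := by omega
      have : (2:Nat)^k ≤ 2 ^ Nat.log2 t := Nat.pow_le_pow_right (by norm_num) hkn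
      have hle : (2:Nat)^k ≤ t := le_trans this hlow
      have : ((2:Nat)^k : Int) ≤ (t : Int) := by exact_mod_cast hle
      push_cast at this
      omega
    · -- 1 ≤ p (start)
      omega
    · -- 1 ≤ e
      omega
    · -- e - 1 < 100, since t ≤ 2^62 - 1 under Dom so log2 t ≤ 62
      have hNb : -2147483648 ≤ N ∧ N ≤ 2147483648 := by
        have := hdom
        unfold Dom_find_q pvDomInt at this
        simpa using this
      have hMb : M ≤ 2^62 := by
        rw [hMdef]
        nlinarith [hNb.1, hNb.2]
      have htb : t < 2 ^ 63 := by
        have : (t : Int) < 2 ^ 63 := by rw [htM]; norm_num; omega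
        exact_mod_cast this
      have : Nat.log2 t < 63 := by
        rw [Nat.log2_lt (by omega)]
        exact htb
      omega
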